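-- pv_equiv track=rewrite | github.com/Fallen37/Fake_News_Detection | app.py | _get_specialized_sources
-- ===== SOURCE A (Python) =====
-- def _get_specialized_sources(user_input: str, keywords: list, specialized_db: dict):
--     """Get topic-specific sources"""
--
--     specialized_sources = []
--     user_lower = user_input.lower()
--
--     # Topic mappings
--     if any(word in user_lower for word in ['gold', 'price', 'market', 'stock', 'economy', 'financial']):
--         specialized_sources.extend(specialized_db['financial'][:2])
--     elif any(word in user_lower for word in ['technology', 'tech', 'computer', 'software']):
--         specialized_sources.extend(specialized_db['technology'][:2])
--     elif any(word in user_lower for word in ['health', 'medical', 'disease', 'vaccine']):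
--         specialized_sources.extend(specialized_db['health'][:2])
--     elif any(word in user_lower for word in ['sports', 'football', 'cricket', 'olympics']):
--         specialized_sources.extend(specialized_db['sports'][:2])
--     elif any(word in user_lower for word in ['science', 'research', 'study', 'discovery']):
--         specialized_sources.extend(specialized_db['science'][:2])
--
--     return specialized_sources
-- ===== SOURCE B (Python) =====
-- # Inverted index: each trigger keyword maps to the priority rank of its topic.
-- _KEYWORD_PRIORITY = {
--     'gold': 0, 'price': 0, 'market': 0, 'stock': 0, 'economy': 0, 'financial': 0,
--     'technology': 1, 'tech': 1, 'computer': 1, 'software': 1,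
--     'health': 2, 'medical': 2, 'disease': 2, 'vaccine': 2,
--     'sports': 3, 'football': 3, 'cricket': 3, 'olympics': 3,
--     'science': 4, 'research': 4, 'study': 4, 'discovery': 4,
-- }
-- _TOPICS = ['financial', 'technology', 'health', 'sports', 'science']
--
--
-- def _get_specialized_sources(user_input: str, keywords: list, specialized_db: dict):
--     """Get topic-specific sources: take the best-priority topic among all
--     matching trigger keywords of the inverted index."""
--     user_lower = user_input.lower()
--     best = min((prio for kw, prio in _KEYWORD_PRIORITY.items() if kw in user_lower),
--                default=None)
--     if best is None:
--         return []
--     return specialized_db[_TOPICS[best]][:2]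
-- ===== Notes on version B (the rewrite author's own statement) =====
-- stated objective: alternative
-- what changed: Replaced the five-way if/elif chain over per-topic keyword lists by an inverted index (keyword -> topic priority): B scans all keywords once, takes the minimum priority among those occurring in the lowered input, and indexes a topic table with it.
import Mathlib
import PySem

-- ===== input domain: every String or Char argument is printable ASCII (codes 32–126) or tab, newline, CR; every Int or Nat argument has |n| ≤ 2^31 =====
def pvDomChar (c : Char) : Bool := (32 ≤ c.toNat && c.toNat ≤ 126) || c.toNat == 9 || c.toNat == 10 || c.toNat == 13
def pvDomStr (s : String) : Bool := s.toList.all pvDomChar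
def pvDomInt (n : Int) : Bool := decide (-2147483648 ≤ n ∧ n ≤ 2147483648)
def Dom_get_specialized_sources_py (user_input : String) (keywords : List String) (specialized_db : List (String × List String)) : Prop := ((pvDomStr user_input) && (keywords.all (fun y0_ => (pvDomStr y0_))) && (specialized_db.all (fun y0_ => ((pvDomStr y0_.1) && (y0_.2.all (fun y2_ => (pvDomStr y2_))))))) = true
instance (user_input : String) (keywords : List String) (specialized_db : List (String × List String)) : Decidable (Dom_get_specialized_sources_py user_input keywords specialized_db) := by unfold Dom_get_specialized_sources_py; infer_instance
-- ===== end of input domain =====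

-- B replaces A's five-way if/elif chain with an inverted index keyword -> topic priority:
-- one scan over all keywords, minimum matching priority, topic looked up by rank (objective: alternative).

-- dict[k] lookup (first match); Python raises KeyError when absent — those inputs are outside Pre_
def pvDbGet (specialized_db : List (String × List String)) (k : String) : List String :=
  ((PySem.Dict.mk specialized_db).get? k).getD []

-- ===== PORT A =====
def get_specialized_sources_py (user_input : String) (keywords : List String) (specialized_db : List (String × List String)) : List String :=
  let specialized_sources : List String := []
  let user_lower := PySem.Str.lower user_input
  if ["gold", "price", "market", "stock", "economy", "financial"].any (fun word => PySem.Str.isIn word user_lower) then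
    specialized_sources ++ PySem.List.slice (pvDbGet specialized_db "financial") none (some 2)
  else if ["technology", "tech", "computer", "software"].any (fun word => PySem.Str.isIn word user_lower) then
    specialized_sources ++ PySem.List.slice (pvDbGet specialized_db "technology") none (some 2)
  else if ["health", "medical", "disease", "vaccine"].any (fun word => PySem.Str.isIn word user_lower) then
    specialized_sources ++ PySem.List.slice (pvDbGet specialized_db "health") none (some 2)
  else if ["sports", "football", "cricket", "olympics"].any (fun word => PySem.Str.isIn word user_lower) then
    specialized_sources ++ PySem.List.slice (pvDbGet specialized_db "sports") none (some 2)
  else if ["science", "research", "study", "discovery"].any (fun word => PySem.Str.isIn word user_lower) then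
    specialized_sources ++ PySem.List.slice (pvDbGet specialized_db "science") none (some 2)
  else
    specialized_sources

-- ===== PORT B =====
-- _KEYWORD_PRIORITY: the inverted index, in the Python dict's insertion order
def pvKwPrio : List (String × Nat) :=
  [("gold", 0), ("price", 0), ("market", 0), ("stock", 0), ("economy", 0), ("financial", 0),
   ("technology", 1), ("tech", 1), ("computer", 1), ("software", 1),
   ("health", 2), ("medical", 2), ("disease", 2), ("vaccine", 2),
   ("sports", 3), ("football", 3), ("cricket", 3), ("olympics", 3),
   ("science", 4), ("research", 4), ("study", 4), ("discovery", 4)]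

-- _TOPICS
def pvTopics : List String := ["financial", "technology", "health", "sports", "science"]

def get_specialized_sources_py_alt (user_input : String) (keywords : List String) (specialized_db : List (String × List String)) : List String :=
  let user_lower := PySem.Str.lower user_input
  -- min(prio for kw, prio in _KEYWORD_PRIORITY.items() if kw in user_lower, default=None)
  let best := ((pvKwPrio.filter (fun q => PySem.Str.isIn q.1 user_lower)).map Prod.snd).min?
  match best with
  | none => []
  | some b => PySem.List.slice (pvDbGet specialized_db ((PySem.List.pyGet? pvTopics (b : Int)).getD "")) none (some 2)

-- ===== PRECONDITION & SPEC =====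
def pvHasWord (user_input : String) (words : List String) : Bool :=
  words.any (fun word => PySem.Str.isIn word (PySem.Str.lower user_input))

def pvHasKey (specialized_db : List (String × List String)) (k : String) : Bool :=
  specialized_db.any (fun p => p.1 == k)

-- Pre_ excludes exactly the inputs where Python A raises KeyError: the first topic (in
-- priority order) whose keywords occur in the lowered input must be a key of the dict.
def pvPreB (user_input : String) (specialized_db : List (String × List String)) : Bool :=
  if pvHasWord user_input ["gold", "price", "market", "stock", "economy", "financial"] then
    pvHasKey specialized_db "financial"
  else if pvHasWord user_input ["technology", "tech", "computer", "software"] then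
    pvHasKey specialized_db "technology"
  else if pvHasWord user_input ["health", "medical", "disease", "vaccine"] then
    pvHasKey specialized_db "health"
  else if pvHasWord user_input ["sports", "football", "cricket", "olympics"] then
    pvHasKey specialized_db "sports"
  else if pvHasWord user_input ["science", "research", "study", "discovery"] then
    pvHasKey specialized_db "science"
  else true

def Pre_get_specialized_sources_py (user_input : String) (keywords : List String) (specialized_db : List (String × List String)) : Prop :=
  pvPreB user_input specialized_db = true

instance (user_input : String) (keywords : List String) (specialized_db : List (String × List String)) : Decidable (Pre_get_specialized_sources_py user_input keywords specialized_db) := by unfold Pre_get_specialized_sources_py; infer_instance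

def pvWitness_get_specialized_sources_py : String × List String × (List (String × List String)) :=
  ("Gold price today", [], [("financial", ["f1", "f2", "f3"])])

def Spec_get_specialized_sources_py (user_input : String) (keywords : List String) (specialized_db : List (String × List String)) (out : List String) : Prop := out = get_specialized_sources_py_alt user_input keywords specialized_db
instance (user_input : String) (keywords : List String) (specialized_db : List (String × List String)) (out : List String) : Decidable (Spec_get_specialized_sources_py user_input keywords specialized_db out) := by unfold Spec_get_specialized_sources_py; infer_instance

-- ===== CLAIM (what is proved, stated in full; the proofs are below) =====
def Claim_equal_get_specialized_sources_py : Prop := ∀ (user_input : String) (keywords : List String) (specialized_db : List (String × List String)), Dom_get_specialized_sources_py user_input keywords specialized_db → Pre_get_specialized_sources_py user_input keywords specialized_db → Spec_get_specialized_sources_py user_input keywords specialized_db (get_specialized_sources_py user_input keywords specialized_db)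

-- ===== LEMMAS AND PROOFS =====

theorem pv_foldl_min_const (i : Nat) (t : List Nat) (h : ∀ x ∈ t, i ≤ x) : t.foldl min i = i := by
  induction t with
  | nil => rfl
  | cons a t ih =>
    simp only [List.foldl_cons]
    rw [Nat.min_eq_left (h a (by simp))]
    exact ih (fun x hx => h x (by simp [hx]))

-- the minimum over a priority group followed by higher-priority pairs: first matching group wins
theorem pv_min?_group (p : String → Bool) (g : List String) (i : Nat) (rest : List (String × Nat))
    (h : ∀ q ∈ rest, i ≤ q.2) :
    (((g.map (fun w => (w, i)) ++ rest).filter (fun q => p q.1)).map Prod.snd).min? =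
      if g.any p then some i else ((rest.filter (fun q => p q.1)).map Prod.snd).min? := by
  induction g with
  | nil => simp only [List.map_nil, List.nil_append, List.any_nil, Bool.false_eq_true, if_false]
  | cons a g ih =>
    by_cases hpa : p a
    · have hmem : ∀ x ∈ (((g.map (fun w => (w, i)) ++ rest).filter (fun q => p q.1)).map Prod.snd), i ≤ x := by
        intro x hx
        simp only [List.mem_map, List.mem_filter, List.mem_append] at hx
        obtain ⟨q, ⟨hq, _⟩, rfl⟩ := hx
        rcases hq with hq | hq
        · obtain ⟨w, -, rfl⟩ := hq
          exact le_refl i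
        · exact h q hq
      simp only [List.map_cons, List.cons_append, List.filter_cons, hpa, if_true,
        List.any_cons, Bool.true_or]
      rw [List.min?_cons', pv_foldl_min_const i _ hmem]
    · simp only [List.map_cons, List.cons_append, List.filter_cons, hpa,
        List.any_cons, Bool.false_or]
      exact ih

theorem pv_alt_eq (user_input : String) (keywords : List String) (specialized_db : List (String × List String)) :
    get_specialized_sources_py_alt user_input keywords specialized_db =
      get_specialized_sources_py user_input keywords specialized_db := by
  simp only [get_specialized_sources_py_alt, get_specialized_sources_py]
  generalize PySem.Str.lower user_input = ul
  rw [show pvKwPrio =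
      ["gold", "price", "market", "stock", "economy", "financial"].map (fun w => (w, 0)) ++
      [("technology", 1), ("tech", 1), ("computer", 1), ("software", 1),
       ("health", 2), ("medical", 2), ("disease", 2), ("vaccine", 2),
       ("sports", 3), ("football", 3), ("cricket", 3), ("olympics", 3),
       ("science", 4), ("research", 4), ("study", 4), ("discovery", 4)] from rfl,
    pv_min?_group (fun w => PySem.Str.isIn w ul) _ 0 _ (by decide),
    show ([("technology", 1), ("tech", 1), ("computer", 1), ("software", 1),
       ("health", 2), ("medical", 2), ("disease", 2), ("vaccine", 2),
       ("sports", 3), ("football", 3), ("cricket", 3), ("olympics", 3),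
       ("science", 4), ("research", 4), ("study", 4), ("discovery", 4)] : List (String × Nat)) =
      ["technology", "tech", "computer", "software"].map (fun w => (w, 1)) ++
      [("health", 2), ("medical", 2), ("disease", 2), ("vaccine", 2),
       ("sports", 3), ("football", 3), ("cricket", 3), ("olympics", 3),
       ("science", 4), ("research", 4), ("study", 4), ("discovery", 4)] from rfl,
    pv_min?_group (fun w => PySem.Str.isIn w ul) _ 1 _ (by decide),
    show ([("health", 2), ("medical", 2), ("disease", 2), ("vaccine", 2),
       ("sports", 3), ("football", 3), ("cricket", 3), ("olympics", 3),
       ("science", 4), ("research", 4), ("study", 4), ("discovery", 4)] : List (String × Nat)) =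
      ["health", "medical", "disease", "vaccine"].map (fun w => (w, 2)) ++
      [("sports", 3), ("football", 3), ("cricket", 3), ("olympics", 3),
       ("science", 4), ("research", 4), ("study", 4), ("discovery", 4)] from rfl,
    pv_min?_group (fun w => PySem.Str.isIn w ul) _ 2 _ (by decide),
    show ([("sports", 3), ("football", 3), ("cricket", 3), ("olympics", 3),
       ("science", 4), ("research", 4), ("study", 4), ("discovery", 4)] : List (String × Nat)) =
      ["sports", "football", "cricket", "olympics"].map (fun w => (w, 3)) ++
      [("science", 4), ("research", 4), ("study", 4), ("discovery", 4)] from rfl,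
    pv_min?_group (fun w => PySem.Str.isIn w ul) _ 3 _ (by decide),
    show ([("science", 4), ("research", 4), ("study", 4), ("discovery", 4)] : List (String × Nat)) =
      ["science", "research", "study", "discovery"].map (fun w => (w, 4)) ++ ([] : List (String × Nat)) from rfl,
    pv_min?_group (fun w => PySem.Str.isIn w ul) _ 4 _ (by decide)]
  simp only [List.filter_nil, List.map_nil, List.min?_nil, List.nil_append]
  split_ifs <;> rfl

-- ===== VERDICT (by name: the statement is the Claim_ definition above) =====
theorem get_specialized_sources_py_spec : Claim_equal_get_specialized_sources_py := by
  intro user_input keywords specialized_db _ _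
  exact (pv_alt_eq user_input keywords specialized_db).symm
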